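-- pv_equiv track=rewrite | github.com/greenblat/vlsistuff | regfile/pybin/regfile.py | treatTemplates
-- ===== SOURCE A (Python) =====
-- def treatTemplates(Lines):
--     Templates = {}
--     Curr = []
--     state = 'idle'
--     Result = []
--     for Lnum,Line in Lines:
--         if state=='idle':
--             if Line[0]=='template':
--                 Name = Line[1]
--                 Curr = []
--                 state = 'work'
--             elif Line[0]=='instance':
--                 Temp = Line[1]
--                 Inst = Line[2]
--                 for LL in Templates[Temp]:
--                     LX = LL[:]
--                     if LX[0]=='reg':
--                         LX[1] = Inst+LX[1]
--                     Result.append((Lnum,LX))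
--             else:
--                 Result.append((Lnum,Line))
--         elif state=='work':
--             if Line[0] == 'endtemplate':
--                 Templates[Name] = Curr[:]
--                 state='idle'
--             else:
--                 Curr.append(Line)
--     return Result
-- ===== SOURCE B (Python) =====
-- def treatTemplates(Lines):
--     Templates = {}
--     Result = []
--     lines = list(Lines)
--     n = len(lines)
--     i = 0
--     while i < n:
--         Lnum, Line = lines[i]
--         i += 1
--         if Line[0] == 'template':
--             Name = Line[1]
--             body = []
--             while i < n and lines[i][1][0] != 'endtemplate':
--                 body.append(lines[i][1])
--                 i += 1
--             if i < n:          # saw the endtemplate; otherwise the template is left unstored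
--                 Templates[Name] = body
--                 i += 1
--         elif Line[0] == 'instance':
--             Temp = Line[1]
--             Inst = Line[2]
--             Result.extend(
--                 (Lnum, ['reg', Inst + LL[1]] + LL[2:]) if LL[0] == 'reg' else (Lnum, LL[:])
--                 for LL in Templates[Temp])
--         else:
--             Result.append((Lnum, Line))
--     return Result
-- ===== Notes on version B (the rewrite author's own statement) =====
-- stated objective: alternative
-- what changed: Replaced A's single-pass state-machine (state flag plus Curr/Name carried across iterations, appending into a shared Result) by an index-driven loop whose inner while-loop collects each template body on the spot and whose instantiation is a single comprehension, so no mode flag or cross-iteration carry variables remain.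
-- outside the precondition, e.g. on treatTemplates([(1, ['template', 'T']), (2, ['reg']), (3, ['endtemplate'])]): A returns [], B returns []
import Mathlib
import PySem

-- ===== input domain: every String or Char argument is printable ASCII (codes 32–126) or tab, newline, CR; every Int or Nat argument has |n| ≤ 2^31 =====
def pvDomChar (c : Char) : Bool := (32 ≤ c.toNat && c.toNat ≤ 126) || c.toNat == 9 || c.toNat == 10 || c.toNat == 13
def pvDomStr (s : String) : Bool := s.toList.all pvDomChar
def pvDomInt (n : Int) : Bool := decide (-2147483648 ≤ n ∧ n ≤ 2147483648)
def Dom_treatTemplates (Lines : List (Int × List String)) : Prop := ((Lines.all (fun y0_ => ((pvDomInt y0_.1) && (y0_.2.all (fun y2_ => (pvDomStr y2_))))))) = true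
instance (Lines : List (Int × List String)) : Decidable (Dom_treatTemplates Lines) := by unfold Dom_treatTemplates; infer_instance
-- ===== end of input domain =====

-- B replaces A's one-pass state-machine fold by an index-free nested recursion (an inner scan
-- collects each template body); objective: alternative decomposition, same cost. Return value only.

-- ===== PORT A =====
-- state = (Templates, Curr, state-flag, Name, Result); one fold step per input line, as in A.
def pvStepA (s : PySem.Dict String (List (List String)) × List (List String) × String × String × List (Int × List String))
    (ln : Int × List String) :
    PySem.Dict String (List (List String)) × List (List String) × String × String × List (Int × List String) :=
  let (tpl, curr, st, name, res) := s
  let (lnum, line) := ln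
  if st = "idle" then
    if line.headD "" = "template" then
      (tpl, [], "work", line.getD 1 "", res)
    else if line.headD "" = "instance" then
      -- 'for LL in Templates[Temp]: …; Result.append((Lnum, LX))'; Templates[Temp] present under Pre_
      (tpl, curr, st, name,
        res ++ (tpl.getD (line.getD 1 "") []).map (fun LL =>
          (lnum, match LL with
                 | "reg" :: x :: r => "reg" :: (line.getD 2 "" ++ x) :: r
                 | _ => LL)))
    else
      (tpl, curr, st, name, res ++ [(lnum, line)])
  else
    if line.headD "" = "endtemplate" then
      (tpl.insert name curr, curr, "idle", name, res)
    else
      (tpl, curr ++ [line], st, name, res)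

def treatTemplates (Lines : List (Int × List String)) : List (Int × List String) :=
  (Lines.foldl pvStepA (PySem.Dict.empty, [], "idle", "", [])).2.2.2.2

-- ===== PORT B =====
-- inner scan of Source B: collect lines until 'endtemplate'; none = input ran out (template unstored)
def pvScanBody (acc : List (List String)) :
    List (Int × List String) → Option (List (List String) × List (Int × List String))
  | [] => none
  | (_, l) :: rest =>
      if l.headD "" = "endtemplate" then some (acc, rest)
      else pvScanBody (acc ++ [l]) rest

theorem pvScanBody_shrink (acc : List (List String)) (ls : List (Int × List String))
    (body : List (List String)) (rest : List (Int × List String))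
    (h : pvScanBody acc ls = some (body, rest)) : rest.length < ls.length := by
  induction ls generalizing acc with
  | nil => simp [pvScanBody] at h
  | cons p tl ih =>
      obtain ⟨_, l⟩ := p
      simp only [pvScanBody] at h
      split at h
      · cases h; simp
      · exact Nat.lt_trans (ih _ h) (by simp)

def pvRegFix (inst : String) (LL : List String) : List String :=
  match LL with
  | "reg" :: x :: r => "reg" :: (inst ++ x) :: r
  | _ => LL

def pvGoB (tpl : PySem.Dict String (List (List String))) :
    List (Int × List String) → List (Int × List String)
  | [] => []
  | (lnum, l) :: rest =>
      if l.headD "" = "template" then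
        match h : pvScanBody [] rest with
        | none => []
        | some (body, rest') =>
            have : rest'.length < rest.length := pvScanBody_shrink _ _ _ _ h
            pvGoB (tpl.insert (l.getD 1 "") body) rest'
      else if l.headD "" = "instance" then
        (tpl.getD (l.getD 1 "") []).map (fun LL => (lnum, pvRegFix (l.getD 2 "") LL))
          ++ pvGoB tpl rest
      else
        (lnum, l) :: pvGoB tpl rest
  termination_by ls => ls.length
  decreasing_by
    all_goals simp_all
    all_goals omega

def treatTemplates_alt (Lines : List (Int × List String)) : List (Int × List String) :=
  pvGoB PySem.Dict.empty Lines

-- ===== PRECONDITION & SPEC =====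
-- Syntactic well-formedness of the line list (a grammar check, not a run of either program):
-- every line nonempty; 'template' lines carry a name; 'instance' lines carry template and instance
-- names and refer to an already-completed template; 'reg' lines inside a template body carry a name.
-- The last clause narrows slightly: A only raises on a short 'reg' body line if the template is
-- actually instantiated; Pre_ rejects it even in a never-instantiated body (A returns there).
def pvPreChk (st : Option String) (names : List String) : List (Int × List String) → Bool
  | [] => true
  | (_, l) :: rest =>
      match st, l with
      | _, [] => false
      | none, "template" :: t =>
          match t with
          | [] => false
          | nm :: _ => pvPreChk (some nm) names rest
      | none, "instance" :: t =>
          match t with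
          | tmp :: _ :: _ => names.contains tmp && pvPreChk none names rest
          | _ => false
      | none, _ => pvPreChk none names rest
      | some nm, "endtemplate" :: _ => pvPreChk none (nm :: names) rest
      | some nm, "reg" :: t => !t.isEmpty && pvPreChk (some nm) names rest
      | some nm, _ => pvPreChk (some nm) names rest

def Pre_treatTemplates (Lines : List (Int × List String)) : Prop :=
  pvPreChk none [] Lines = true
instance (Lines : List (Int × List String)) : Decidable (Pre_treatTemplates Lines) := by
  unfold Pre_treatTemplates; infer_instance

def pvWitness_treatTemplates : (List (Int × List String)) :=
  [(1, ["template", "T"]), (2, ["reg", "a"]), (3, ["wire", "w"]), (4, ["endtemplate"]),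
   (5, ["instance", "T", "u_"]), (6, ["assign", "x"])]

def Spec_treatTemplates (Lines : List (Int × List String)) (out : List (Int × List String)) : Prop := out = treatTemplates_alt Lines
instance (Lines : List (Int × List String)) (out : List (Int × List String)) : Decidable (Spec_treatTemplates Lines out) := by unfold Spec_treatTemplates; infer_instance

-- ===== CLAIM (what is proved, stated in full; the proofs are below) =====
def Claim_equal_treatTemplates : Prop := ∀ (Lines : List (Int × List String)), Dom_treatTemplates Lines → Pre_treatTemplates Lines → Spec_treatTemplates Lines (treatTemplates Lines)

-- ===== LEMMAS AND PROOFS =====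

-- The two fold invariants (idle and work state), proved together by strong induction on length.
-- The ports in fact agree on every input; neither Dom_ nor Pre_ is needed for the equality.
theorem pvInvariant (n : Nat) :
    ∀ ls : List (Int × List String), ls.length ≤ n →
      (∀ (tpl : PySem.Dict String (List (List String))) curr name res,
        (ls.foldl pvStepA (tpl, curr, "idle", name, res)).2.2.2.2 = res ++ pvGoB tpl ls) ∧
      (∀ (tpl : PySem.Dict String (List (List String))) acc name res,
        (ls.foldl pvStepA (tpl, acc, "work", name, res)).2.2.2.2 =
          match pvScanBody acc ls with
          | none => res
          | some (body, rest') => res ++ pvGoB (tpl.insert name body) rest') := by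
  induction n with
  | zero =>
      intro ls hls
      have : ls = [] := List.length_eq_zero_iff.mp (Nat.le_zero.mp hls)
      subst this
      constructor
      · intro tpl curr name res; simp [pvGoB]
      · intro tpl acc name res; simp [pvScanBody]
  | succ n ih =>
      intro ls hls
      cases ls with
      | nil =>
          constructor
          · intro tpl curr name res; simp [pvGoB]
          · intro tpl acc name res; simp [pvScanBody]
      | cons p rest =>
          obtain ⟨lnum, l⟩ := p
          have hrest : rest.length ≤ n := by simpa using Nat.le_of_succ_le_succ hls
          constructor
          · -- idle state
            intro tpl curr name res
            simp only [List.foldl_cons, pvStepA]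
            rw [if_pos trivial]
            by_cases h1 : l.headD "" = "template"
            · rw [if_pos h1]
              have hw := (ih rest hrest).2 tpl [] (l.getD 1 "") res
              rw [hw]
              rw [pvGoB, if_pos h1]
              split <;> rename_i heq <;> (split <;> rename_i heq2 <;> simp_all)
            · by_cases h2 : l.headD "" = "instance"
              · rw [if_neg h1, if_pos h2]
                have := (ih rest hrest).1 tpl curr name
                  (res ++ (tpl.getD (l.getD 1 "") []).map (fun LL =>
                    (lnum, match LL with
                           | "reg" :: x :: r => "reg" :: (l.getD 2 "" ++ x) :: r
                           | _ => LL)))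
                rw [this, pvGoB, if_neg h1, if_pos h2, List.append_assoc]
                rfl
              · rw [if_neg h1, if_neg h2]
                rw [(ih rest hrest).1 tpl curr name (res ++ [(lnum, l)]),
                    pvGoB, if_neg h1, if_neg h2]
                simp
          · -- work state
            intro tpl acc name res
            simp only [List.foldl_cons, pvStepA]
            rw [if_neg (by decide : ¬ ("work" : String) = "idle")]
            by_cases h1 : l.headD "" = "endtemplate"
            · rw [if_pos h1]
              rw [(ih rest hrest).1 (tpl.insert name acc) acc name res]
              rw [pvScanBody, if_pos h1]
            · rw [if_neg h1]
              rw [(ih rest hrest).2 tpl (acc ++ [l]) name res]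
              rw [pvScanBody, if_neg h1]

-- ===== VERDICT (by name: the statement is the Claim_ definition above) =====
theorem treatTemplates_spec : Claim_equal_treatTemplates := by
  intro Lines _ _
  unfold Spec_treatTemplates treatTemplates treatTemplates_alt
  simpa using (pvInvariant Lines.length Lines le_rfl).1 PySem.Dict.empty [] "" []
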